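-- pv_equiv track=rewrite | github.com/bobcaoge/my-code | python/leetcode/672_Bulb_Switcher_II.py | flipLights
-- ===== SOURCE A (Python) =====
-- def flipLights(n, m):
--     """
--     :type n: int
--     :type m: int
--     :rtype: int
--     """
--     s = set()
--     s.add(tuple((0 for _ in range(n))))
--     n = min(n, 10)
--     for i in range(m):
--         buff = set()
--         for bulbs in s:
--             # flip all
--             buff.add(tuple([1-x for x in bulbs]))
--             # flip even
--             buff.add(tuple([x if index % 2 == 0 else 1-x for index, x in enumerate(bulbs)]))
--             # flip odd
--             buff.add(tuple([x if index % 2 != 0 else 1-x for index, x in enumerate(bulbs)]))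
--             # flip 3K+1
--             buff.add(tuple([1-x if (index%3 == 0) else x for index, x in enumerate(bulbs)]))
--         s = buff
--     return len(s)
-- ===== SOURCE B (Python) =====
-- def flipLights(n, m):
--     """
--     :type n: int
--     :type m: int
--     :rtype: int
--     """
--     if n <= 0 or m <= 0:
--         return 1
--     if n == 1:
--         return 2
--     if n == 2:
--         return 3 if m == 1 else 4
--     return 4 if m == 1 else (7 if m == 2 else 8)
-- ===== Notes on version B (the rewrite author's own statement) =====
-- stated objective: faster
-- what changed: Replaced the breadth-first enumeration of reachable bulb-state sets (m rounds, 4 O(n) flip operations per state) with the closed-form answer table obtained from the period-6 structure of the four commuting flips (only min(n,3) bulbs and min(m,3) rounds matter).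
import Mathlib
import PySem

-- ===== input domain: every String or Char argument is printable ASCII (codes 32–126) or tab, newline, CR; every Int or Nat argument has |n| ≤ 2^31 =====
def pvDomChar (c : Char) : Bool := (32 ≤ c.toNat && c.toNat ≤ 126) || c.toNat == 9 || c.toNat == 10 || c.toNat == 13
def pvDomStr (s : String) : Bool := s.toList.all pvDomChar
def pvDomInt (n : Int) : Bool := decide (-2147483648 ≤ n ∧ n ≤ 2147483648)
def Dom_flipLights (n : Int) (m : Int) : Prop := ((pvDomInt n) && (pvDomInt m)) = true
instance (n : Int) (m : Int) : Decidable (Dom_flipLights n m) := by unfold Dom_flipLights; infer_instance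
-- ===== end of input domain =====

-- B replaces A's breadth-first enumeration of reachable bulb-state sets with the closed-form
-- answer table (only min(n,3) bulbs and min(m,3) rounds matter); objective: faster.

-- ===== PORT A =====
-- one round of A's loop body: for each state add the four flipped states to a fresh set
def stepA (s : PySem.Set (List Int)) : PySem.Set (List Int) :=
  s.foldl (fun buff bulbs =>
    PySem.Set.add (PySem.Set.add (PySem.Set.add (PySem.Set.add buff
      (bulbs.map (fun x => 1 - x)))
      ((PySem.List.enumerate bulbs).map (fun p => if p.1 % 2 = 0 then p.2 else 1 - p.2)))
      ((PySem.List.enumerate bulbs).map (fun p => if p.1 % 2 ≠ 0 then p.2 else 1 - p.2)))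
      ((PySem.List.enumerate bulbs).map (fun p => if p.1 % 3 = 0 then 1 - p.2 else p.2)))
    PySem.Set.empty

def flipLights (n : Int) (m : Int) : Int :=
  let s : PySem.Set (List Int) := PySem.Set.empty
  let s := PySem.Set.add s ((PySem.List.pyRange 0 n 1).map (fun _ => (0 : Int)))
  let _n2 := min n 10   -- A's 'n = min(n, 10)': dead in A too (n is never read afterwards)
  let s := (PySem.List.pyRange 0 m 1).foldl (fun s _i => stepA s) s
  PySem.Set.len s

-- ===== PORT B =====
def flipLights_alt (n : Int) (m : Int) : Int :=
  if n ≤ 0 ∨ m ≤ 0 then 1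
  else if n = 1 then 2
  else if n = 2 then (if m = 1 then 3 else 4)
  else if m = 1 then 4 else if m = 2 then 7 else 8

-- ===== PRECONDITION & SPEC =====
def Spec_flipLights (n : Int) (m : Int) (out : Int) : Prop := out = flipLights_alt n m
instance (n : Int) (m : Int) (out : Int) : Decidable (Spec_flipLights n m out) := by unfold Spec_flipLights; infer_instance

-- ===== CLAIM (what is proved, stated in full; the proofs are below) =====
def Claim_equal_flipLights : Prop := ∀ (n : Int) (m : Int), Dom_flipLights n m → Spec_flipLights n m (flipLights n m)

-- ===== LEMMAS AND PROOFS =====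

-- A state reachable by A is determined by which of the four flips have been applied an odd
-- number of times: a 4-bit vector (a = all, b = even positions 0,2,…, c = odd positions, d = 3k).
abbrev V4 := Bool × Bool × Bool × Bool

def entB (v : V4) (i : Nat) : Bool :=
  (v.1.xor (if i % 2 = 0 then v.2.1 else v.2.2.1)).xor (if i % 3 = 0 then v.2.2.2 else false)

def entI (b : Bool) : Int := if b then 1 else 0

def ent (v : V4) (i : Nat) : Int := entI (entB v i)

-- the bulb state (list of 0/1) of parity vector v with n bulbs
def stv (v : V4) (n : Int) : List Int := (List.range n.toNat).map (ent v)

def togA (v : V4) : V4 := (!v.1, v.2.1, v.2.2.1, v.2.2.2)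
def togB (v : V4) : V4 := (v.1, !v.2.1, v.2.2.1, v.2.2.2)
def togC (v : V4) : V4 := (v.1, v.2.1, !v.2.2.1, v.2.2.2)
def togD (v : V4) : V4 := (v.1, v.2.1, v.2.2.1, !v.2.2.2)

def agreeB (k : Nat) (u w : V4) : Bool := (List.range k).all (fun i => entB u i == entB w i)

def addV (k : Nat) (C : List V4) (u : V4) : List V4 :=
  if C.any (fun v => agreeB k v u) then C else C ++ [u]

def stepV (k : Nat) (C : List V4) : List V4 :=
  C.foldl (fun buff v => addV k (addV k (addV k (addV k buff (togA v)) (togC v)) (togB v)) (togD v)) []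

def v0 : V4 := (false, false, false, false)

lemma entI_not (b : Bool) : 1 - entI b = entI (!b) := by cases b <;> decide

lemma ent_inj (u w : V4) (i : Nat) : ent u i = ent w i ↔ entB u i = entB w i := by
  unfold ent entI; cases h1 : entB u i <;> cases h2 : entB w i <;> simp

lemma entB_togA (v : V4) (i : Nat) : entB (togA v) i = !(entB v i) := by
  obtain ⟨a, b, c, d⟩ := v
  simp only [entB, togA]
  cases a <;> cases (if i % 2 = 0 then b else c) <;> cases (if i % 3 = 0 then d else false) <;> rfl

lemma entB_togB (v : V4) (i : Nat) :
    entB (togB v) i = if i % 2 = 0 then !(entB v i) else entB v i := by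
  obtain ⟨a, b, c, d⟩ := v
  by_cases h : i % 2 = 0 <;>
    simp only [entB, togB, h, if_true, if_false] <;>
    cases a <;> cases b <;> cases c <;> cases (if i % 3 = 0 then d else false) <;> rfl

lemma entB_togC (v : V4) (i : Nat) :
    entB (togC v) i = if i % 2 = 0 then entB v i else !(entB v i) := by
  obtain ⟨a, b, c, d⟩ := v
  by_cases h : i % 2 = 0 <;>
    simp only [entB, togC, h, if_true, if_false] <;>
    cases a <;> cases b <;> cases c <;> cases (if i % 3 = 0 then d else false) <;> rfl

lemma entB_togD (v : V4) (i : Nat) :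
    entB (togD v) i = if i % 3 = 0 then !(entB v i) else entB v i := by
  obtain ⟨a, b, c, d⟩ := v
  by_cases h : i % 3 = 0 <;>
    simp only [entB, togD, h, if_true, if_false] <;>
    cases a <;> cases d <;> cases (if i % 2 = 0 then b else c) <;> rfl

-- pushing a comprehension over enumerate back to a comprehension over the index range
lemma enum_map (k : Nat) (f : Nat → Int) (g : Int → Int → Int) :
    (PySem.List.enumerate ((List.range k).map f)).map (fun p => g p.1 p.2) =
      (List.range k).map (fun i : Nat => g (i : Int) (f i)) := by
  apply List.ext_getElem
  · simp [PySem.List.length_enumerate]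
  · intro i h1 h2
    simp [PySem.List.getElem_enumerate]

lemma opA_eq (v : V4) (n : Int) : (stv v n).map (fun x => 1 - x) = stv (togA v) n := by
  unfold stv
  rw [List.map_map]
  apply List.map_congr_left
  intro i _
  simp only [Function.comp, ent, entI_not, entB_togA]

lemma opC_eq (v : V4) (n : Int) :
    (PySem.List.enumerate (stv v n)).map (fun p => if p.1 % 2 = 0 then p.2 else 1 - p.2) =
      stv (togC v) n := by
  unfold stv
  rw [enum_map n.toNat (ent v) (fun i x => if i % 2 = 0 then x else 1 - x)]
  apply List.map_congr_left
  intro i _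
  have hc : ((i : Int) % 2 = 0) ↔ (i % 2 = 0) := by omega
  by_cases h : i % 2 = 0 <;>
    simp only [hc, h, if_true, if_false, ent, entI_not, entB_togC]

lemma opB_eq (v : V4) (n : Int) :
    (PySem.List.enumerate (stv v n)).map (fun p => if p.1 % 2 ≠ 0 then p.2 else 1 - p.2) =
      stv (togB v) n := by
  unfold stv
  rw [enum_map n.toNat (ent v) (fun i x => if i % 2 ≠ 0 then x else 1 - x)]
  apply List.map_congr_left
  intro i _
  have hc : ((i : Int) % 2 ≠ 0) ↔ ¬ (i % 2 = 0) := by omega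
  by_cases h : i % 2 = 0 <;>
    simp only [hc, h, not_true, not_false_iff, if_true, if_false, ent, entI_not, entB_togB]

lemma opD_eq (v : V4) (n : Int) :
    (PySem.List.enumerate (stv v n)).map (fun p => if p.1 % 3 = 0 then 1 - p.2 else p.2) =
      stv (togD v) n := by
  unfold stv
  rw [enum_map n.toNat (ent v) (fun i x => if i % 3 = 0 then 1 - x else x)]
  apply List.map_congr_left
  intro i _
  have hc : ((i : Int) % 3 = 0) ↔ (i % 3 = 0) := by omega
  by_cases h : i % 3 = 0 <;>
    simp only [hc, h, if_true, if_false, ent, entI_not, entB_togD]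

lemma stv_eq_iff (u w : V4) (n : Int) : stv u n = stv w n ↔ agreeB n.toNat u w = true := by
  unfold stv agreeB
  rw [List.map_inj_left, List.all_eq_true]
  constructor
  · intro h i hi; rw [beq_iff_eq]; exact (ent_inj u w i).mp (h i hi)
  · intro h i hi; exact (ent_inj u w i).mpr (beq_iff_eq.mp (h i hi))

lemma add_corr (n : Int) (C : List V4) (u : V4) :
    PySem.Set.add (C.map (fun v => stv v n)) (stv u n) = (addV n.toNat C u).map (fun v => stv v n) := by
  rw [PySem.Set.add_eq_ite]
  unfold addV
  by_cases h : C.any (fun v => agreeB n.toNat v u) = true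
  · rw [if_pos h, if_pos]
    rw [List.any_eq_true] at h
    obtain ⟨v, hv, hvu⟩ := h
    exact List.mem_map.mpr ⟨v, hv, (stv_eq_iff v u n).mpr hvu⟩
  · rw [if_neg h, if_neg, List.map_append, List.map_singleton]
    intro hmem
    obtain ⟨v, hv, hvu⟩ := List.mem_map.mp hmem
    exact h (List.any_eq_true.mpr ⟨v, hv, (stv_eq_iff v u n).mp hvu⟩)

lemma fold_corr (n : Int) (C B : List V4) :
    (C.map (fun v => stv v n)).foldl (fun buff bulbs =>
      PySem.Set.add (PySem.Set.add (PySem.Set.add (PySem.Set.add buff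
        (bulbs.map (fun x => 1 - x)))
        ((PySem.List.enumerate bulbs).map (fun p => if p.1 % 2 = 0 then p.2 else 1 - p.2)))
        ((PySem.List.enumerate bulbs).map (fun p => if p.1 % 2 ≠ 0 then p.2 else 1 - p.2)))
        ((PySem.List.enumerate bulbs).map (fun p => if p.1 % 3 = 0 then 1 - p.2 else p.2)))
      (B.map (fun v => stv v n)) =
    (C.foldl (fun buff v => addV n.toNat (addV n.toNat (addV n.toNat (addV n.toNat buff (togA v)) (togC v)) (togB v)) (togD v)) B).map (fun v => stv v n) := by
  induction C generalizing B with
  | nil => rfl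
  | cons v C ih =>
    simp only [List.map_cons, List.foldl_cons]
    rw [opA_eq, add_corr, opC_eq, add_corr, opB_eq, add_corr, opD_eq, add_corr]
    exact ih _

lemma stepA_corr (n : Int) (C : List V4) :
    stepA (C.map (fun v => stv v n)) = (stepV n.toNat C).map (fun v => stv v n) := by
  unfold stepA stepV
  have := fold_corr n C []
  simpa using this

lemma iterate_corr (n : Int) (j : Nat) :
    stepA^[j] [stv v0 n] = ((stepV n.toNat)^[j] [v0]).map (fun v => stv v n) := by
  induction j with
  | zero => rfl
  | succ j ih =>
    rw [Function.iterate_succ_apply', Function.iterate_succ_apply', ih, stepA_corr]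

lemma foldl_const {α β : Type} (l : List α) (f : β → β) (s : β) :
    l.foldl (fun s _ => f s) s = f^[l.length] s := by
  induction l generalizing s with
  | nil => rfl
  | cons x xs ih => simp [List.foldl_cons, ih, Function.iterate_succ_apply]

lemma zeros_eq (n : Int) : (PySem.List.pyRange 0 n 1).map (fun _ => (0 : Int)) = stv v0 n := by
  rw [PySem.List.pyRange_one, List.map_map]
  unfold stv
  have : (n - 0).toNat = n.toNat := by omega
  rw [this]
  apply List.map_congr_left
  intro i _
  have : entB v0 i = false := by
    simp only [entB, v0]
    cases h2 : decide (i % 2 = 0) <;> cases h3 : decide (i % 3 = 0) <;> simp_all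
  simp [Function.comp, ent, this, entI]

lemma flipLights_eq_len (n m : Int) :
    flipLights n m = ((((stepV n.toNat)^[m.toNat] [v0]).length : Int)) := by
  unfold flipLights
  have hinit : PySem.Set.add PySem.Set.empty (stv v0 n) = [stv v0 n] := by
    simp [PySem.Set.empty]
  have hm : (m - 0).toNat = m.toNat := by omega
  simp only [zeros_eq, hinit, foldl_const, PySem.List.length_pyRange_one, hm, iterate_corr,
    PySem.Set.len, List.length_map]

-- for n ≥ 3 the membership test only depends on bulbs 0, 1, 2
lemma agree3_all (u w : V4) (h : agreeB 3 u w = true) : ∀ i, entB u i = entB w i := by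
  rw [agreeB, List.all_eq_true] at h
  have h0 : entB u 0 = entB w 0 := beq_iff_eq.mp (h 0 (by decide))
  have h1 : entB u 1 = entB w 1 := beq_iff_eq.mp (h 1 (by decide))
  have h2 : entB u 2 = entB w 2 := beq_iff_eq.mp (h 2 (by decide))
  obtain ⟨a, b, c, d⟩ := u
  obtain ⟨a', b', c', d'⟩ := w
  simp only [entB] at h0 h1 h2
  norm_num at h0 h1 h2
  intro i
  by_cases hp : i % 2 = 0 <;> by_cases hq : i % 3 = 0 <;>
    simp only [entB, hp, hq, if_true, if_false] <;>
    revert h0 h1 h2 <;>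
    cases a <;> cases b <;> cases c <;> cases d <;>
    cases a' <;> cases b' <;> cases c' <;> cases d' <;> decide

lemma agreeB_ge3 (k : Nat) (hk : 3 ≤ k) (u w : V4) : agreeB k u w = agreeB 3 u w := by
  cases h3 : agreeB 3 u w with
  | true =>
    rw [agreeB, List.all_eq_true]
    intro i _
    exact beq_iff_eq.mpr (agree3_all u w h3 i)
  | false =>
    by_contra hne
    have hk' : agreeB k u w = true := by
      cases h : agreeB k u w
      · exact absurd h hne
      · rfl
    rw [agreeB, List.all_eq_true] at hk'
    have : agreeB 3 u w = true := by
      rw [agreeB, List.all_eq_true]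
      intro i hi
      exact hk' i (List.mem_range.mpr (lt_of_lt_of_le (List.mem_range.mp hi) hk))
    rw [this] at h3; cases h3

lemma addV_ge3 (k : Nat) (hk : 3 ≤ k) (C : List V4) (u : V4) : addV k C u = addV 3 C u := by
  unfold addV
  have : (fun v => agreeB k v u) = (fun v => agreeB 3 v u) := by
    funext v; exact agreeB_ge3 k hk v u
  rw [this]

lemma stepV_ge3 (k : Nat) (hk : 3 ≤ k) (C : List V4) : stepV k C = stepV 3 C := by
  unfold stepV
  have : (fun (buff : List V4) v => addV k (addV k (addV k (addV k buff (togA v)) (togC v)) (togB v)) (togD v)) =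
         (fun (buff : List V4) v => addV 3 (addV 3 (addV 3 (addV 3 buff (togA v)) (togC v)) (togB v)) (togD v)) := by
    funext buff v
    rw [addV_ge3 k hk, addV_ge3 k hk, addV_ge3 k hk, addV_ge3 k hk]
  rw [this]

lemma per2' {α : Type} (f : α → α) (x : α) (h : f (f x) = x) :
    ∀ i, f^[i] x = x ∨ f^[i] x = f x := by
  intro i
  induction i with
  | zero => left; rfl
  | succ i ih =>
    rw [Function.iterate_succ_apply']
    rcases ih with h' | h' <;> rw [h']
    · right; rfl
    · left; exact h

lemma len_tail3 (k L : Nat)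
    (hp : stepV k (stepV k ((stepV k)^[3] [v0])) = (stepV k)^[3] [v0])
    (hl3 : ((stepV k)^[3] [v0]).length = L)
    (hl4 : ((stepV k)^[4] [v0]).length = L) :
    ∀ j, ((stepV k)^[j + 3] [v0]).length = L := by
  intro j
  rw [Function.iterate_add_apply]
  have h4 : stepV k ((stepV k)^[3] [v0]) = (stepV k)^[4] [v0] :=
    (Function.iterate_succ_apply' _ 3 _).symm
  rcases per2' (stepV k) ((stepV k)^[3] [v0]) hp j with h | h <;> rw [h]
  · exact hl3
  · rw [h4]; exact hl4

-- the distinct-state count after j rounds, for the four regimes of k = number of bulbs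
lemma lenV (k j : Nat) (hk : k ≤ 3) :
    ((stepV k)^[j] [v0]).length =
      if j = 0 then 1 else
      if k = 0 then 1 else
      if k = 1 then 2 else
      if k = 2 then (if j = 1 then 3 else 4) else
      (if j = 1 then 4 else if j = 2 then 7 else 8) := by
  have t0 : ∀ j, ((stepV 0)^[j + 3] [v0]).length = 1 :=
    len_tail3 0 1 (by decide) (by decide) (by decide)
  have t1 : ∀ j, ((stepV 1)^[j + 3] [v0]).length = 2 :=
    len_tail3 1 2 (by decide) (by decide) (by decide)
  have t2 : ∀ j, ((stepV 2)^[j + 3] [v0]).length = 4 :=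
    len_tail3 2 4 (by decide) (by decide) (by decide)
  have t3 : ∀ j, ((stepV 3)^[j + 3] [v0]).length = 8 :=
    len_tail3 3 8 (by decide) (by decide) (by decide)
  interval_cases k <;> rcases j with _ | _ | _ | j <;>
    first
      | decide
      | simpa using t0 j
      | simpa using t1 j
      | simpa using t2 j
      | simpa using t3 j

-- ===== VERDICT (by name: the statement is the Claim_ definition above) =====
theorem flipLights_spec : Claim_equal_flipLights := by
  intro n m _
  unfold Spec_flipLights
  rw [flipLights_eq_len]
  have hmin : (stepV n.toNat)^[m.toNat] [v0] = (stepV (min n.toNat 3))^[m.toNat] [v0] := by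
    rcases le_total n.toNat 3 with h | h
    · rw [Nat.min_eq_left h]
    · have heq : stepV n.toNat = stepV 3 := funext (stepV_ge3 n.toNat h)
      rw [heq, Nat.min_eq_right h]
  rw [hmin, lenV (min n.toNat 3) m.toNat (by omega)]
  unfold flipLights_alt
  split_ifs <;> omega
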